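-- pv_equiv track=rewrite | github.com/iterasdev/peppol-py | src/peppol_py/smp.py | check_missing_peppol_doc_types
-- ===== SOURCE A (Python) =====
-- def check_missing_peppol_doc_types(service_urls):
--     supported_doc_types = [url for url in service_urls if "busdox-docid-qns" in url]
--     supported_doc_types = ",".join(supported_doc_types)
--
--     required_doc_types = ['Invoice-2', 'CreditNote-2']
--     missing_doc_types = []
--     for required_doc_type in required_doc_types:
--         if required_doc_type not in supported_doc_types:
--             missing_doc_types.append(required_doc_type)
--
--     return missing_doc_types
-- ===== SOURCE B (Python) =====
-- def check_missing_peppol_doc_types(service_urls):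
--     has_invoice = False
--     has_creditnote = False
--     for url in service_urls:
--         if "busdox-docid-qns" in url:
--             if "Invoice-2" in url:
--                 has_invoice = True
--             if "CreditNote-2" in url:
--                 has_creditnote = True
--     missing = []
--     if not has_invoice:
--         missing.append('Invoice-2')
--     if not has_creditnote:
--         missing.append('CreditNote-2')
--     return missing
-- ===== Notes on version B (the rewrite author's own statement) =====
-- stated objective: alternative
-- what changed: B makes a single pass over the URLs maintaining one boolean flag per required doc type, instead of A's staged pipeline (build a filtered list, comma-join it into one string, then substring-test each required token against the joined string); no intermediate list or joined string is ever built (equivalent since the tokens contain no comma).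
import Mathlib
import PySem

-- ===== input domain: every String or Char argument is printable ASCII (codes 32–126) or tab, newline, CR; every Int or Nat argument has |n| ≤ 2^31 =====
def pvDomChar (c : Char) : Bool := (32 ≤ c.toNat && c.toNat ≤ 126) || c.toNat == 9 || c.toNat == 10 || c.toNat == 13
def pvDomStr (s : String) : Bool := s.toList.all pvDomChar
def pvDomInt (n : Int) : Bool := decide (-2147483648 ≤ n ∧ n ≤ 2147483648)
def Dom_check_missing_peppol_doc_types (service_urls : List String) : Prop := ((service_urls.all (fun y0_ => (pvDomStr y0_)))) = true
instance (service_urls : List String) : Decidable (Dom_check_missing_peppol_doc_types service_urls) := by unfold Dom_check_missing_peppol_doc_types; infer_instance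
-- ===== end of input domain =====

-- B replaces A's staged pipeline (filter list, comma-join, substring-test the joined string)
-- by a single pass keeping one boolean flag per required doc type (objective: alternative;
-- equivalent since the required tokens contain no comma).

-- ===== PORT A =====
def check_missing_peppol_doc_types (service_urls : List String) : List String :=
  let supported_doc_types := service_urls.filter (fun url => PySem.Str.isIn "busdox-docid-qns" url)
  let joined := PySem.Str.join "," supported_doc_types
  let required_doc_types := ["Invoice-2", "CreditNote-2"]
  required_doc_types.foldl
    (fun missing r => if PySem.Str.isIn r joined then missing else missing ++ [r]) []

-- ===== PORT B =====
def check_missing_peppol_doc_types_alt (service_urls : List String) : List String :=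
  let flags := service_urls.foldl
    (fun (st : Bool × Bool) url =>
      if PySem.Str.isIn "busdox-docid-qns" url then
        ((if PySem.Str.isIn "Invoice-2" url then true else st.1),
         (if PySem.Str.isIn "CreditNote-2" url then true else st.2))
      else st)
    (false, false)
  (if flags.1 then [] else ["Invoice-2"]) ++ (if flags.2 then [] else ["CreditNote-2"])

-- ===== PRECONDITION & SPEC =====
def Spec_check_missing_peppol_doc_types (service_urls : List String) (out : List String) : Prop := out = check_missing_peppol_doc_types_alt service_urls
instance (service_urls : List String) (out : List String) : Decidable (Spec_check_missing_peppol_doc_types service_urls out) := by unfold Spec_check_missing_peppol_doc_types; infer_instance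

-- ===== CLAIM (what is proved, stated in full; the proofs are below) =====
def Claim_equal_check_missing_peppol_doc_types : Prop := ∀ (service_urls : List String), Dom_check_missing_peppol_doc_types service_urls → Spec_check_missing_peppol_doc_types service_urls (check_missing_peppol_doc_types service_urls)

-- ===== LEMMAS AND PROOFS =====

-- A comma-free prefix of l ++ ',' :: l₂ is a prefix of l.
lemma prefix_of_prefix_append_cons {t l l₂ : List Char} {c : Char}
    (hc : c ∉ t) (h : t <+: l ++ c :: l₂) : t <+: l := by
  induction t generalizing l with
  | nil => exact List.nil_prefix
  | cons x t' ih =>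
    cases l with
    | nil =>
      rcases List.cons_prefix_cons.mp h with ⟨hx, _⟩
      exact absurd (hx ▸ List.mem_cons_self) hc
    | cons a l' =>
      rcases List.cons_prefix_cons.mp h with ⟨hx, ht'⟩
      have : t' <+: l' := ih (fun hm => hc (List.mem_cons_of_mem _ hm)) ht'
      exact hx ▸ List.cons_prefix_cons.mpr ⟨rfl, this⟩

-- A comma-free infix of l₁ ++ ',' :: l₂ lies entirely inside l₁ or inside l₂.
lemma infix_append_cons_iff {t l₁ l₂ : List Char} {c : Char} (hc : c ∉ t) :
    t <:+: l₁ ++ c :: l₂ ↔ t <:+: l₁ ∨ t <:+: l₂ := by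
  constructor
  · intro h
    induction l₁ with
    | nil =>
      rcases List.infix_cons_iff.mp h with hp | hi
      · left
        have := prefix_of_prefix_append_cons (l := []) hc hp
        simp_all
      · exact Or.inr hi
    | cons a l₁' ih =>
      rcases List.infix_cons_iff.mp h with hp | hi
      · exact Or.inl (prefix_of_prefix_append_cons hc hp).isInfix
      · rcases ih hi with h1 | h2
        · exact Or.inl (List.infix_cons h1)
        · exact Or.inr h2
  · rintro (h | h)
    · exact h.trans ⟨[], c :: l₂, by simp⟩
    · exact h.trans ⟨l₁ ++ [c], [], by simp⟩

-- A nonempty comma-free token is an infix of the comma-join iff it is an infix of some part.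
lemma infix_join_iff {t : List Char} (hne : t ≠ []) (hc : ',' ∉ t) (parts : List (List Char)) :
    t <:+: PySem.Chars.join [','] parts ↔ ∃ u ∈ parts, t <:+: u := by
  induction parts with
  | nil => simp [PySem.Chars.join_nil, List.infix_nil, hne]
  | cons u rest ih =>
    cases rest with
    | nil => simp [PySem.Chars.join_singleton]
    | cons v rest' =>
      rw [PySem.Chars.join_cons_cons]
      have : u ++ [','] ++ PySem.Chars.join [','] (v :: rest')
          = u ++ ',' :: PySem.Chars.join [','] (v :: rest') := by simp
      rw [this, infix_append_cons_iff hc, ih]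
      simp

lemma isIn_join_eq_any (r : String) (hne : r.toList ≠ []) (hc : ',' ∉ r.toList)
    (us : List String) :
    PySem.Str.isIn r (PySem.Str.join "," us) = us.any (fun u => PySem.Str.isIn r u) := by
  rcases h : us.any (fun u => PySem.Str.isIn r u) with _ | _
  · rw [Bool.eq_false_iff]
    intro hi
    rw [PySem.Str.isIn_iff_infix, PySem.Str.toList_join] at hi
    rw [show (",").toList = [','] from rfl, infix_join_iff hne hc] at hi
    rcases hi with ⟨u, hu, hinf⟩
    rcases List.mem_map.mp hu with ⟨s, hs, rfl⟩
    have : PySem.Str.isIn r s = true := by rw [PySem.Str.isIn_iff_infix]; exact hinf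
    have := List.any_eq_false.mp h s hs
    simp_all
  · rcases List.any_eq_true.mp h with ⟨s, hs, hin⟩
    rw [PySem.Str.isIn_iff_infix, PySem.Str.toList_join, show (",").toList = [','] from rfl, infix_join_iff hne hc]
    exact ⟨s.toList, List.mem_map.mpr ⟨s, hs, rfl⟩, by rw [PySem.Str.isIn_iff_infix] at hin; exact hin⟩

-- B's single-pass flag fold computes, for each token, "initial flag OR some filtered url contains it".
lemma flags_fold_eq (urls : List String) (b1 b2 : Bool) :
    urls.foldl
      (fun (st : Bool × Bool) url =>
        if PySem.Str.isIn "busdox-docid-qns" url then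
          ((if PySem.Str.isIn "Invoice-2" url then true else st.1),
           (if PySem.Str.isIn "CreditNote-2" url then true else st.2))
        else st)
      (b1, b2)
    = (b1 || (urls.filter (fun url => PySem.Str.isIn "busdox-docid-qns" url)).any
          (fun u => PySem.Str.isIn "Invoice-2" u),
       b2 || (urls.filter (fun url => PySem.Str.isIn "busdox-docid-qns" url)).any
          (fun u => PySem.Str.isIn "CreditNote-2" u)) := by
  induction urls generalizing b1 b2 with
  | nil => simp
  | cons u rest ih =>
    simp only [List.foldl_cons, List.filter_cons]
    by_cases hb : PySem.Str.isIn "busdox-docid-qns" u = true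
    · simp only [hb, if_true, ih, List.any_cons, Prod.mk.injEq]
      constructor <;> split_ifs with h <;>
        simp only [PySem.Str.isIn,
          show ("Invoice-2").toList = ['I','n','v','o','i','c','e','-','2'] from rfl,
          show ("CreditNote-2").toList = ['C','r','e','d','i','t','N','o','t','e','-','2'] from rfl] at h <;>
        simp [h]
    · rw [if_neg hb, if_neg hb]
      exact ih b1 b2

-- ===== VERDICT (by name: the statement is the Claim_ definition above) =====
theorem check_missing_peppol_doc_types_spec : Claim_equal_check_missing_peppol_doc_types := by
  intro service_urls _
  unfold Spec_check_missing_peppol_doc_types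
  unfold check_missing_peppol_doc_types check_missing_peppol_doc_types_alt
  simp only [flags_fold_eq, List.foldl_cons, List.foldl_nil,
    isIn_join_eq_any "Invoice-2" (by decide) (by decide),
    isIn_join_eq_any "CreditNote-2" (by decide) (by decide), Bool.false_or]
  cases (service_urls.filter (fun url => PySem.Str.isIn "busdox-docid-qns" url)).any
      (fun u => PySem.Str.isIn "Invoice-2" u) <;>
    cases (service_urls.filter (fun url => PySem.Str.isIn "busdox-docid-qns" url)).any
        (fun u => PySem.Str.isIn "CreditNote-2" u) <;> rfl
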